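-- pv_equiv track=rewrite | github.com/ziya-ai/ziya | app/hallucination/region_extraction.py | _strip_inline_code
-- ===== SOURCE A (Python) =====
-- def _strip_inline_code(line: str) -> str:
--     """
--     Remove inline code spans (text between backticks) from a line.
--
--     Supports multi-backtick markers per CommonMark (e.g. double-backtick
--     spans containing a literal backtick). Unclosed spans are preserved.
--     """
--     out: list[str] = []
--     i = 0
--     n = len(line)
--     while i < n:
--         if line[i] == '`':
--             marker_len = 0
--             while i + marker_len < n and line[i + marker_len] == '`':
--                 marker_len += 1
--             marker = '`' * marker_len
--             close_idx = line.find(marker, i + marker_len)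
--             if close_idx == -1:
--                 out.append(line[i:i + marker_len])
--                 i += marker_len
--             else:
--                 i = close_idx + marker_len
--         else:
--             out.append(line[i])
--             i += 1
--     return ''.join(out)
-- ===== SOURCE B (Python) =====
-- def _strip_inline_code(line: str) -> str:
--     # Two-phase: tokenize the line into maximal backtick runs and text
--     # segments once, then resolve code spans at the token level.
--     toks = []  # ('t', text) or ('r', run_length)
--     i = 0
--     n = len(line)
--     while i < n:
--         j = i
--         if line[i] == '`':
--             while j < n and line[j] == '`':
--                 j += 1
--             toks.append(('r', j - i))
--         else:
--             while j < n and line[j] != '`':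
--                 j += 1
--             toks.append(('t', line[i:j]))
--         i = j
--     out = []
--     k = 0
--     while k < len(toks):
--         kind, v = toks[k]
--         if kind == 't':
--             out.append(v)
--             k += 1
--             continue
--         m = v
--         # find the closing run: first later run of length >= m
--         c = k + 1
--         while c < len(toks) and not (toks[c][0] == 'r' and toks[c][1] >= m):
--             c += 1
--         if c == len(toks):
--             out.append('`' * m)
--             k += 1
--         else:
--             L = toks[c][1]
--             if L == m:
--                 k = c + 1
--             else:
--                 toks[c] = ('r', L - m)
--                 k = c
--     return ''.join(out)
-- ===== Notes on version B (the rewrite author's own statement) =====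
-- stated objective: faster
-- what changed: Replaces the character-by-character scan with repeated substring searches by a one-pass tokenization into maximal backtick runs and text segments, resolving code spans entirely at the token level (closing run = first later run of length >= marker, leftover backticks become a shorter run token).
import Mathlib
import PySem

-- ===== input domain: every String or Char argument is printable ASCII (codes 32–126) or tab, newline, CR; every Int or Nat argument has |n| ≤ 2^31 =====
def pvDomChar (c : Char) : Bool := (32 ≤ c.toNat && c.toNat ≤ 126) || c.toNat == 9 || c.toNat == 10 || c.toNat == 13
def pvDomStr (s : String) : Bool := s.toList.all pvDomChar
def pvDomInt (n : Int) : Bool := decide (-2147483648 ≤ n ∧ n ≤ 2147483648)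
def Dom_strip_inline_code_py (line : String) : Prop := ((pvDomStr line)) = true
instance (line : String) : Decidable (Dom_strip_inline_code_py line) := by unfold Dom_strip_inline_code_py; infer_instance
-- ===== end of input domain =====

-- B is an alternative algorithm (token-level span resolution instead of char scan + substring find); equal return value proved below.

-- ===== PORT A =====
-- inner while: marker_len counting consecutive backticks
def pvRunLenA : List Char → Nat
  | [] => 0
  | c :: rest => if c = '`' then 1 + pvRunLenA rest else 0

-- the outer while loop of A, recursing on the suffix line[i:]; line.find(marker, i+marker_len)
-- is PySem.Chars.find on the suffix starting at i+marker_len (exact: first index of the substring, -1 if absent)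
def pvLoopA (cs : List Char) : List Char :=
  match cs with
  | [] => []
  | c :: rest =>
    if c = '`' then
      let m := 1 + pvRunLenA rest
      let marker := List.replicate m '`'
      let f := PySem.Chars.find ((c :: rest).drop m) marker
      if f = -1 then marker ++ pvLoopA ((c :: rest).drop m)
      else pvLoopA ((c :: rest).drop (m + f.toNat + m))
    else c :: pvLoopA rest
termination_by cs.length
decreasing_by
  all_goals simp only [List.length_drop, List.length_cons]; omega

def strip_inline_code_py (line : String) : String :=
  String.mk (pvLoopA line.toList)

-- ===== PORT B =====
inductive pvTok where
  | text : List Char → pvTok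
  | run : Nat → pvTok
deriving DecidableEq, Repr

-- phase 1 of B: tokenize into maximal backtick runs and text segments
def pvTokenize : List Char → List pvTok
  | [] => []
  | c :: rest =>
    if h : c = '`' then
      pvTok.run ((c :: rest).takeWhile (· == '`')).length :: pvTokenize ((c :: rest).dropWhile (· == '`'))
    else
      pvTok.text ((c :: rest).takeWhile (· != '`')) :: pvTokenize ((c :: rest).dropWhile (· != '`'))
termination_by cs => cs.length
decreasing_by
  · have := List.length_dropWhile_le (p := fun x => x == '`') (l := rest)
    simp [List.dropWhile_cons, h] <;> omega
  · have := List.length_dropWhile_le (p := fun x => x != '`') (l := rest)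
    simp [List.dropWhile_cons, h] <;> omega

-- B's inner scan for the closing run: first later run of length ≥ m
def pvFindClose (m : Nat) : List pvTok → Option (Nat × Nat)
  | [] => none
  | pvTok.run L :: R => if m ≤ L then some (0, L) else (pvFindClose m R).map (fun p => (p.1 + 1, p.2))
  | pvTok.text _ :: R => (pvFindClose m R).map (fun p => (p.1 + 1, p.2))

theorem pvFindClose_lt (m : Nat) (R : List pvTok) (k L : Nat)
    (h : pvFindClose m R = some (k, L)) : k < R.length := by
  induction R generalizing k L with
  | nil => simp [pvFindClose] at h
  | cons t R ih =>
    cases t with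
    | text s =>
      simp only [pvFindClose, Option.map_eq_some_iff] at h
      obtain ⟨⟨k', L'⟩, h1, h2⟩ := h
      simp only [Prod.mk.injEq] at h2
      have := ih k' L' h1
      simp only [List.length_cons]; omega
    | run L' =>
      simp only [pvFindClose] at h
      split at h
      · simp only [Option.some.injEq, Prod.mk.injEq] at h
        simp only [List.length_cons]; omega
      · simp only [Option.map_eq_some_iff] at h
        obtain ⟨⟨k'', L''⟩, h1, h2⟩ := h
        simp only [Prod.mk.injEq] at h2
        have := ih k'' L'' h1
        simp only [List.length_cons]; omega

-- phase 2 of B: resolve spans at the token level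
def pvProcess (T : List pvTok) : List Char :=
  match T with
  | [] => []
  | pvTok.text t :: R => t ++ pvProcess R
  | pvTok.run m :: R =>
    match h : pvFindClose m R with
    | none => List.replicate m '`' ++ pvProcess R
    | some (k, L) =>
      if L = m then pvProcess (R.drop (k + 1))
      else pvProcess (pvTok.run (L - m) :: R.drop (k + 1))
termination_by T.length
decreasing_by
  · simp
  · simp
  · have := pvFindClose_lt m R k L h
    simp only [List.length_drop, List.length_cons]; omega
  · have := pvFindClose_lt m R k L h
    simp only [List.length_cons, List.length_drop]; omega

def strip_inline_code_py_alt (line : String) : String :=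
  String.mk (pvProcess (pvTokenize line.toList))

-- ===== PRECONDITION & SPEC =====
def Spec_strip_inline_code_py (line : String) (out : String) : Prop := out = strip_inline_code_py_alt line
instance (line : String) (out : String) : Decidable (Spec_strip_inline_code_py line out) := by unfold Spec_strip_inline_code_py; infer_instance

-- ===== CLAIM (what is proved, stated in full; the proofs are below) =====
def Claim_equal_strip_inline_code_py : Prop := ∀ (line : String), Dom_strip_inline_code_py line → Spec_strip_inline_code_py line (strip_inline_code_py line)

-- ===== LEMMAS AND PROOFS =====

def pvFlat (T : List pvTok) : List Char :=
  match T with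
  | [] => []
  | pvTok.text t :: R => t ++ pvFlat R
  | pvTok.run m :: R => List.replicate m '`' ++ pvFlat R

def pvNoRunHead (T : List pvTok) : Prop :=
  match T with
  | pvTok.run _ :: _ => False
  | _ => True

def pvWF (T : List pvTok) : Prop :=
  match T with
  | [] => True
  | pvTok.text t :: R => t ≠ [] ∧ (∀ c ∈ t, c ≠ '`') ∧ pvWF R
  | pvTok.run m :: R => 1 ≤ m ∧ pvNoRunHead R ∧ pvWF R

theorem pvWF_tail (T : List pvTok) (h : pvWF T) : pvWF T.tail := by
  cases T with
  | nil => trivial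
  | cons t R => cases t <;> exact h.2.2

theorem pvWF_drop (T : List pvTok) (n : Nat) (h : pvWF T) : pvWF (T.drop n) := by
  induction n generalizing T with
  | zero => exact h
  | succ n ih =>
    cases T with
    | nil => trivial
    | cons t R => exact ih R (pvWF_tail _ h)

theorem pvFlat_head (T : List pvTok) (h : pvWF T) (hn : pvNoRunHead T)
    (x : List Char) (hx : pvFlat T = '`' :: x) : False := by
  cases T with
  | nil => simp [pvFlat] at hx
  | cons t R =>
    cases t with
    | text s =>
      obtain ⟨hne, hfree, -⟩ := h
      cases s with
      | nil => exact hne rfl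
      | cons c cs =>
        simp only [pvFlat, List.cons_append, List.cons.injEq] at hx
        exact hfree c (by simp) hx.1
    | run m => exact hn

theorem pvNoPrefixCons (w : List Char) (a : List Char) (c : Char)
    (hw : ∀ x, w ≠ c :: x) (h : c :: a <+: w) : False := by
  obtain ⟨t, ht⟩ := h
  exact hw (a ++ t) (by simp [← ht])

theorem pvReplicate_prefix (a b : Nat) (c : Char) (h : a ≤ b) :
    List.replicate a c <+: List.replicate b c :=
  ⟨List.replicate (b - a) c, by rw [← List.replicate_add]; congr 1; omega⟩

-- a prefix of backticks of a run-plus-flat string cannot outrun the run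
theorem pvPrefRun (a : Nat) : ∀ (b : Nat) (w : List Char), (∀ x, w ≠ '`' :: x) →
    List.replicate a '`' <+: List.replicate b '`' ++ w → a ≤ b := by
  induction a with
  | zero => omega
  | succ a ih =>
    intro b w hw h
    cases b with
    | zero =>
      simp only [List.replicate, List.nil_append, List.replicate_succ] at h
      exact absurd h (fun h => pvNoPrefixCons w _ _ hw h)
    | succ b =>
      simp only [List.replicate_succ, List.cons_append, List.cons_prefix_cons] at h
      exact Nat.succ_le_succ (ih b w hw h.2)

theorem pvDropRunAppend (m L : Nat) (w : List Char) (h : m ≤ L) :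
    (List.replicate L '`' ++ w).drop m = List.replicate (L - m) '`' ++ w := by
  rw [List.drop_append_of_le_length (by simp [h]), List.drop_replicate]

theorem pvDropShift (L : Nat) (w : List Char) (i : Nat) :
    (List.replicate L '`' ++ w).drop (L + i) = w.drop i := by
  conv_lhs => rw [show L + i = (List.replicate L '`').length + i by simp]
  exact List.drop_length_add_append i

theorem pvLoopA_text (t w : List Char) (ht : ∀ c ∈ t, c ≠ '`') :
    pvLoopA (t ++ w) = t ++ pvLoopA w := by
  induction t with
  | nil => simp
  | cons c t ih =>
    have hc : ¬ c = '`' := ht c (by simp)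
    rw [List.cons_append, pvLoopA.eq_def]
    simp only [hc, if_false]
    rw [ih (fun d hd => ht d (by simp [hd]))]
    simp

theorem pvRunLenA_zero (w : List Char) (hw : ∀ x, w ≠ '`' :: x) : pvRunLenA w = 0 := by
  cases w with
  | nil => rfl
  | cons c cs =>
    have : ¬ c = '`' := fun hc => hw cs (by rw [hc])
    simp [pvRunLenA, this]

theorem pvRunLen_flat (m : Nat) (R : List pvTok) (h : pvWF R) (hn : pvNoRunHead R) :
    pvRunLenA (List.replicate m '`' ++ pvFlat R) = m := by
  induction m with
  | zero =>
    simp only [List.replicate, List.nil_append]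
    exact pvRunLenA_zero _ (fun x hx => pvFlat_head R h hn x hx)
  | succ m ih => simp [List.replicate_succ, pvRunLenA, ih]; omega

-- pins Chars.find to its specification value
theorem pvFind_eq (s pat : List Char) (j : Nat)
    (h1 : pat <+: s.drop j) (h2 : ∀ i < j, ¬ pat <+: s.drop i) :
    PySem.Chars.find s pat = (j : Int) := by
  have hinf : pat <:+: s := h1.isInfix.trans (s.drop_suffix j).isInfix
  have hnn : 0 ≤ PySem.Chars.find s pat := (PySem.Chars.find_nonneg_iff s pat).mpr hinf
  obtain ⟨hp, hmin⟩ := PySem.Chars.find_spec (s := s) (sub := pat) hnn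
  rcases Nat.lt_trichotomy (PySem.Chars.find s pat).toNat j with hlt | heq | hgt
  · exact absurd hp (h2 _ hlt)
  · omega
  · exact absurd h1 (hmin _ hgt)

-- no backtick marker can start inside a backtick-free text segment
theorem pvNoPrefText (t w : List Char) (ht : ∀ c ∈ t, c ≠ '`') (m : Nat) (hm : 1 ≤ m)
    (i : Nat) (hi : i < t.length) : ¬ List.replicate m '`' <+: (t ++ w).drop i := by
  intro hp
  rw [List.drop_append_of_le_length (Nat.le_of_lt hi)] at hp
  cases heq : t.drop i with
  | nil => simp [List.drop_eq_nil_iff] at heq; omega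
  | cons d r =>
    rw [heq] at hp
    obtain ⟨m', rfl⟩ : ∃ m', m = m' + 1 := ⟨m - 1, by omega⟩
    rw [List.replicate_succ, List.cons_append, List.cons_prefix_cons] at hp
    exact ht d (List.drop_subset i t (by simp [heq])) hp.1.symm

-- the core correspondence between B's token-level close search and Python's str.find
theorem pvFind_corr (m : Nat) (hm : 1 ≤ m) (R : List pvTok) (h : pvWF R) :
    (pvFindClose m R = none → ∀ j, ¬ List.replicate m '`' <+: (pvFlat R).drop j) ∧
    (∀ k L, pvFindClose m R = some (k, L) → ∃ j,
      (List.replicate m '`' <+: (pvFlat R).drop j) ∧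
      (∀ i < j, ¬ List.replicate m '`' <+: (pvFlat R).drop i) ∧
      (pvFlat R).drop (j + m) = List.replicate (L - m) '`' ++ pvFlat (R.drop (k + 1)) ∧
      m ≤ L ∧ pvNoRunHead (R.drop (k + 1))) := by
  induction R with
  | nil =>
    constructor
    · intro _ j hp
      have := hp.length_le
      simp [pvFlat] at this; omega
    · intro k L hk; simp [pvFindClose] at hk
  | cons t R ih =>
    cases t with
    | text t =>
      obtain ⟨hne, hfree, hwf⟩ := h
      have ih := ih hwf
      constructor
      · intro hnone j hp
        simp only [pvFindClose, Option.map_eq_none_iff] at hnone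
        rcases Nat.lt_or_ge j t.length with hj | hj
        · exact pvNoPrefText t (pvFlat R) hfree m hm j hj hp
        · refine ih.1 hnone (j - t.length) ?_
          rw [show pvFlat (pvTok.text t :: R) = t ++ pvFlat R from rfl,
            show j = t.length + (j - t.length) by omega, List.drop_length_add_append] at hp
          exact hp
      · intro k L hk
        simp only [pvFindClose, Option.map_eq_some_iff] at hk
        obtain ⟨⟨k', L'⟩, h1, h2⟩ := hk
        simp only [Prod.mk.injEq] at h2
        obtain ⟨j', hp', hmin', hdrop', hml', hnr'⟩ := ih.2 k' L' h1
        refine ⟨t.length + j', ?_, ?_, ?_, ?_, ?_⟩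
        · simpa [pvFlat, List.drop_length_add_append] using hp'
        · intro i hi hp
          rcases Nat.lt_or_ge i t.length with hit | hit
          · exact pvNoPrefText t (pvFlat R) hfree m hm i hit hp
          · refine hmin' (i - t.length) (by omega) ?_
            rw [show pvFlat (pvTok.text t :: R) = t ++ pvFlat R from rfl,
              show i = t.length + (i - t.length) by omega, List.drop_length_add_append] at hp
            exact hp
        · rw [show pvFlat (pvTok.text t :: R) = t ++ pvFlat R from rfl, Nat.add_assoc,
            List.drop_length_add_append, ← h2.2, hdrop', show k = k' + 1 by omega]
          rfl
        · omega
        · rw [show k = k' + 1 by omega]; exact hnr'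
    | run L0 =>
      obtain ⟨hL0, hnr, hwf⟩ := h
      have hw : ∀ x, pvFlat R ≠ '`' :: x := fun x hx => pvFlat_head R hwf hnr x hx
      have ih := ih hwf
      by_cases hmL : m ≤ L0
      · constructor
        · intro hnone; simp [pvFindClose, hmL] at hnone
        · intro k L hk
          simp only [pvFindClose, if_pos hmL, Option.some.injEq, Prod.mk.injEq] at hk
          obtain ⟨rfl, rfl⟩ : 0 = k ∧ L0 = L := hk
          refine ⟨0, ?_, by omega, ?_, hmL, ?_⟩
          · simp only [pvFlat, List.drop_zero]
            exact (pvReplicate_prefix m L0 '`' hmL).trans (List.prefix_append _ _)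
          · simp only [pvFlat, Nat.zero_add]
            rw [pvDropRunAppend m L0 _ hmL]
            rfl
          · exact hnr
      · have hstep : ∀ i, List.replicate m '`' <+: (pvFlat (pvTok.run L0 :: R)).drop i →
            L0 ≤ i ∧ List.replicate m '`' <+: (pvFlat R).drop (i - L0) := by
          intro i hp
          rcases Nat.lt_or_ge i L0 with hi | hi
          · exfalso
            rw [show pvFlat (pvTok.run L0 :: R) = List.replicate L0 '`' ++ pvFlat R from rfl,
              pvDropRunAppend i L0 _ (Nat.le_of_lt hi)] at hp
            have hxw : ∀ x, pvFlat R ≠ '`' :: x := hw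
            have := pvPrefRun m (L0 - i) (pvFlat R) hxw hp
            omega
          · refine ⟨hi, ?_⟩
            rw [show pvFlat (pvTok.run L0 :: R) = List.replicate L0 '`' ++ pvFlat R from rfl,
              show i = L0 + (i - L0) by omega, pvDropShift] at hp
            exact hp
        constructor
        · intro hnone j hp
          simp only [pvFindClose, if_neg hmL, Option.map_eq_none_iff] at hnone
          obtain ⟨-, hp'⟩ := hstep j hp
          exact ih.1 hnone _ hp'
        · intro k L hk
          simp only [pvFindClose, if_neg hmL, Option.map_eq_some_iff] at hk
          obtain ⟨⟨k', L'⟩, h1, h2⟩ := hk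
          simp only [Prod.mk.injEq] at h2
          obtain ⟨j', hp', hmin', hdrop', hml', hnr'⟩ := ih.2 k' L' h1
          refine ⟨L0 + j', ?_, ?_, ?_, ?_, ?_⟩
          · rw [show pvFlat (pvTok.run L0 :: R) = List.replicate L0 '`' ++ pvFlat R from rfl,
              pvDropShift]
            exact hp'
          · intro i hi hp
            obtain ⟨hge, hp'2⟩ := hstep i hp
            exact hmin' (i - L0) (by omega) hp'2
          · rw [show pvFlat (pvTok.run L0 :: R) = List.replicate L0 '`' ++ pvFlat R from rfl,
              Nat.add_assoc, pvDropShift, ← h2.2, hdrop', show k = k' + 1 by omega]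
            rfl
          · omega
          · rw [show k = k' + 1 by omega]; exact hnr' 

theorem pvTakeWhilePred (p : Char → Bool) (l : List Char) (x : Char) (h : x ∈ l.takeWhile p) :
    p x = true := by
  induction l with
  | nil => simp at h
  | cons c cs ih =>
    rw [List.takeWhile_cons] at h
    by_cases hc : p c = true
    · rw [if_pos hc] at h
      rcases List.mem_cons.mp h with rfl | h'
      · exact hc
      · exact ih h'
    · rw [if_neg hc] at h; simp at h

theorem pvDropWhileHead (p : Char → Bool) (l : List Char) (d : Char) (r : List Char)
    (h : l.dropWhile p = d :: r) : ¬ p d = true := by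
  have := List.head?_dropWhile_not p l
  rw [h] at this; simpa using this

-- B's "find = -1" direction packaged on the string side
theorem pvFindNone (w pat : List Char) (h : ∀ j, ¬ pat <+: w.drop j) :
    PySem.Chars.find w pat = -1 := by
  rw [PySem.Chars.find_eq_neg_one_iff]
  intro hc
  obtain ⟨j, hj⟩ := (PySem.Chars.exists_prefix_drop_iff_isIn pat w).mpr
    ((PySem.Chars.isIn_iff_infix pat w).mpr hc)
  exact h j hj

-- unfolding pvLoopA at the head of a maximal backtick run
theorem pvLoopA_run (m : Nat) (hm : 1 ≤ m) (w : List Char)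
    (hrun : pvRunLenA (List.replicate m '`' ++ w) = m) :
    pvLoopA (List.replicate m '`' ++ w) =
      (if PySem.Chars.find w (List.replicate m '`') = -1
       then List.replicate m '`' ++ pvLoopA w
       else pvLoopA (w.drop ((PySem.Chars.find w (List.replicate m '`')).toNat + m))) := by
  obtain ⟨m', rfl⟩ : ∃ m', m = m' + 1 := ⟨m - 1, by omega⟩
  have hr' : 1 + pvRunLenA (List.replicate m' '`' ++ w) = m' + 1 := by
    rw [List.replicate_succ, List.cons_append] at hrun
    simpa [pvRunLenA] using hrun
  conv_lhs => rw [List.replicate_succ, List.cons_append, pvLoopA.eq_def]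
  simp only [if_pos rfl, hr', if_true]
  have hcons : '`' :: (List.replicate m' '`' ++ w) = List.replicate (m' + 1) '`' ++ w := by
    rw [List.replicate_succ, List.cons_append]
  have hdropm : ('`' :: (List.replicate m' '`' ++ w)).drop (m' + 1) = w := by
    rw [hcons, pvDropRunAppend (m' + 1) (m' + 1) w le_rfl]
    simp [List.replicate]
  rw [hdropm]
  by_cases hf : PySem.Chars.find w (List.replicate (m' + 1) '`') = -1
  · rw [if_pos hf, if_pos hf]
  · rw [if_neg hf, if_neg hf]
    congr 1
    rw [hcons, show m' + 1 + (PySem.Chars.find w (List.replicate (m' + 1) '`')).toNat + (m' + 1) =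
      m' + 1 + ((PySem.Chars.find w (List.replicate (m' + 1) '`')).toNat + (m' + 1)) by omega,
      pvDropShift]

theorem pvMain (n : Nat) : ∀ T : List pvTok, T.length ≤ n → pvWF T →
    pvLoopA (pvFlat T) = pvProcess T := by
  induction n with
  | zero =>
    intro T hT _
    have : T = [] := List.eq_nil_of_length_eq_zero (by omega)
    subst this
    rw [show pvFlat [] = [] from rfl, pvLoopA.eq_def, pvProcess.eq_1]
  | succ n ih =>
    intro T hT hWF
    cases T with
    | nil => rw [show pvFlat [] = [] from rfl, pvLoopA.eq_def, pvProcess.eq_1]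
    | cons t R =>
      cases t with
      | text t =>
        obtain ⟨hne, hfree, hwf⟩ := hWF
        rw [show pvFlat (pvTok.text t :: R) = t ++ pvFlat R from rfl,
          pvLoopA_text t (pvFlat R) hfree,
          ih R (by simp at hT; omega) hwf]
        rw [pvProcess.eq_2]
      | run m =>
        obtain ⟨hm, hnr, hwf⟩ := hWF
        have hrun : pvRunLenA (List.replicate m '`' ++ pvFlat R) = m :=
          pvRunLen_flat m R hwf hnr
        rw [show pvFlat (pvTok.run m :: R) = List.replicate m '`' ++ pvFlat R from rfl,
          pvLoopA_run m hm (pvFlat R) hrun]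
        have hcorr := pvFind_corr m hm R hwf
        cases hc : pvFindClose m R with
        | none =>
          rw [if_pos (pvFindNone _ _ (hcorr.1 hc))]
          rw [ih R (by simp at hT; omega) hwf]
          conv_rhs => rw [pvProcess.eq_3]
          split
          · rfl
          · rename_i heq
            rw [hc] at heq
            cases heq
        | some kl =>
          obtain ⟨k, L⟩ := kl
          obtain ⟨j, hp, hmin, hdrop, hml, hnr'⟩ := hcorr.2 k L hc
          have hfind : PySem.Chars.find (pvFlat R) (List.replicate m '`') = (j : Int) :=
            pvFind_eq (pvFlat R) (List.replicate m '`') j hp hmin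
          rw [hfind]
          rw [if_neg (by omega)]
          simp only [Int.toNat_natCast]
          rw [hdrop]
          have hkR : k < R.length := pvFindClose_lt m R k L hc
          simp only [List.length_cons] at hT
          by_cases hLm : L = m
          · subst hLm
            simp only [Nat.sub_self, List.replicate, List.nil_append]
            rw [ih (R.drop (k + 1)) (by simp; omega) (pvWF_drop R (k + 1) hwf)]
            conv_rhs => rw [pvProcess.eq_3]
            split
            · rename_i heq
              rw [hc] at heq
              cases heq
            · rename_i k' L' heq
              rw [hc] at heq
              simp only [Option.some.injEq, Prod.mk.injEq] at heq
              obtain ⟨rfl, rfl⟩ := heq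
              rw [if_pos rfl]
          · have : List.replicate (L - m) '`' ++ pvFlat (R.drop (k + 1)) =
                pvFlat (pvTok.run (L - m) :: R.drop (k + 1)) := rfl
            rw [this, ih (pvTok.run (L - m) :: R.drop (k + 1))
              (by simp; omega)
              ⟨by omega, hnr', pvWF_drop R (k + 1) hwf⟩]
            conv_rhs => rw [pvProcess.eq_3]
            split
            · rename_i heq
              rw [hc] at heq
              cases heq
            · rename_i k' L' heq
              rw [hc] at heq
              simp only [Option.some.injEq, Prod.mk.injEq] at heq
              obtain ⟨rfl, rfl⟩ := heq
              rw [if_neg hLm]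

theorem pvTokenize_nil : pvTokenize [] = [] := by rw [pvTokenize.eq_def]

theorem pvTokenize_flat (n : Nat) : ∀ cs : List Char, cs.length ≤ n →
    pvFlat (pvTokenize cs) = cs := by
  induction n with
  | zero =>
    intro cs h
    have : cs = [] := List.eq_nil_of_length_eq_zero (by omega)
    subst this; rw [pvTokenize_nil]; rfl
  | succ n ih =>
    intro cs h
    cases cs with
    | nil => rw [pvTokenize_nil]; rfl
    | cons c rest =>
      simp only [List.length_cons] at h
      by_cases hc : c = '`'
      · rw [pvTokenize, dif_pos hc]
        have hdw : ((c :: rest).dropWhile (· == '`')).length < (c :: rest).length := by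
          have := List.length_dropWhile_le (p := fun x => x == '`') (l := rest)
          simp [List.dropWhile_cons, hc]; omega
        rw [show pvFlat (pvTok.run ((c :: rest).takeWhile (· == '`')).length ::
            pvTokenize ((c :: rest).dropWhile (· == '`'))) =
          List.replicate ((c :: rest).takeWhile (· == '`')).length '`' ++
            pvFlat (pvTokenize ((c :: rest).dropWhile (· == '`'))) from rfl]
        rw [ih _ (by simp only [List.length_cons] at hdw; omega)]
        have ht : (c :: rest).takeWhile (· == '`') =
            List.replicate ((c :: rest).takeWhile (· == '`')).length '`' :=
          List.eq_replicate_of_mem (fun x hx => by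
            have := pvTakeWhilePred _ _ _ hx; simpa using this)
        rw [← ht, List.takeWhile_append_dropWhile]
      · rw [pvTokenize, dif_neg hc]
        have hdw : ((c :: rest).dropWhile (· != '`')).length < (c :: rest).length := by
          have := List.length_dropWhile_le (p := fun x => x != '`') (l := rest)
          simp [List.dropWhile_cons, hc]; omega
        rw [show pvFlat (pvTok.text ((c :: rest).takeWhile (· != '`')) ::
            pvTokenize ((c :: rest).dropWhile (· != '`'))) =
          (c :: rest).takeWhile (· != '`') ++
            pvFlat (pvTokenize ((c :: rest).dropWhile (· != '`'))) from rfl]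
        rw [ih _ (by simp only [List.length_cons] at hdw; omega),
          List.takeWhile_append_dropWhile]

theorem pvTokenize_noRunHead (cs : List Char) (hc : ∀ x, cs ≠ '`' :: x) :
    pvNoRunHead (pvTokenize cs) := by
  cases cs with
  | nil => rw [pvTokenize_nil]; trivial
  | cons c rest =>
    have : ¬ c = '`' := fun h => hc rest (by rw [h])
    rw [pvTokenize, dif_neg this]
    trivial

theorem pvTokenize_wf (n : Nat) : ∀ cs : List Char, cs.length ≤ n →
    pvWF (pvTokenize cs) := by
  induction n with
  | zero =>
    intro cs h
    have : cs = [] := List.eq_nil_of_length_eq_zero (by omega)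
    subst this; rw [pvTokenize_nil]; trivial
  | succ n ih =>
    intro cs h
    cases cs with
    | nil => rw [pvTokenize_nil]; trivial
    | cons c rest =>
      simp only [List.length_cons] at h
      by_cases hc : c = '`'
      · rw [pvTokenize, dif_pos hc]
        have hdw : ((c :: rest).dropWhile (· == '`')).length < (c :: rest).length := by
          have := List.length_dropWhile_le (p := fun x => x == '`') (l := rest)
          simp [List.dropWhile_cons, hc]; omega
        refine ⟨?_, ?_, ih _ (by simp only [List.length_cons] at hdw; omega)⟩
        · rw [List.takeWhile_cons, if_pos (by simp [hc])]
          simp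
        · apply pvTokenize_noRunHead
          intro x hx
          have := pvDropWhileHead (· == '`') (c :: rest) '`' x hx
          simp at this
      · rw [pvTokenize, dif_neg hc]
        have hdw : ((c :: rest).dropWhile (· != '`')).length < (c :: rest).length := by
          have := List.length_dropWhile_le (p := fun x => x != '`') (l := rest)
          simp [List.dropWhile_cons, hc]; omega
        refine ⟨?_, ?_, ih _ (by simp only [List.length_cons] at hdw; omega)⟩
        · rw [List.takeWhile_cons, if_pos (by simp [hc])]
          simp
        · intro x hx
          rcases List.mem_cons.mp (by
            rw [List.takeWhile_cons, if_pos (by simp [hc])] at hx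
            exact hx) with rfl | h'
          · exact hc
          · have := pvTakeWhilePred _ _ _ h'
            simpa using this

-- ===== VERDICT (by name: the statement is the Claim_ definition above) =====
theorem strip_inline_code_py_spec : Claim_equal_strip_inline_code_py := by
  intro line _
  unfold Spec_strip_inline_code_py strip_inline_code_py strip_inline_code_py_alt
  have := pvMain (pvTokenize line.toList).length (pvTokenize line.toList) le_rfl
    (pvTokenize_wf line.toList.length line.toList le_rfl)
  rw [pvTokenize_flat line.toList.length line.toList le_rfl] at this
  rw [this]
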